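-- pv_equiv track=rewrite | github.com/lake041/sesac-algorithm | 김민재/알고리즘/프로그래머스/카카오 기출문제/2019 카카오 개발자 겨울 인턴십/불량 사용자.py | solution
-- ===== SOURCE A (Python) =====
-- from itertools import combinations, permutations
--
-- def possible(u, b):
--     return len(u)==len(b) and all(y in (x, "*") for x, y in zip(u, b))
--
-- def solution(user_id, banned_id):
--     ans = 0
--     for user_combi in combinations(user_id, len(banned_id)):
--         for user_permu in permutations(user_combi, len(banned_id)):
--             if all(possible(u, b) for u, b in zip(user_permu, banned_id)):
--                 ans += 1
--                 break
--
--     return ans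
-- ===== SOURCE B (Python) =====
-- from itertools import combinations
--
-- def solution(user_id, banned_id):
--     def match(u, b):
--         return len(u) == len(b) and all(bc == '*' or bc == uc for uc, bc in zip(u, b))
--     cands = [[i for i in range(len(user_id)) if match(user_id[i], b)] for b in banned_id]
--     def can_assign(cs, avail):
--         if not cs:
--             return True
--         return any(can_assign(cs[1:], avail - {i}) for i in cs[0] if i in avail)
--     return sum(1 for idx in combinations(range(len(user_id)), len(banned_id))
--                if can_assign(cands, set(idx)))
-- ===== Notes on version B (the rewrite author's own statement) =====
-- stated objective: faster
-- what changed: Instead of enumerating all k! permutations of each chosen user combination, B precomputes per-pattern candidate index lists once and decides each index combination with a recursive backtracking assignment that only extends consistent partial matchings; intended as faster (a timing run saw A time out at n=16 where B returned, so no ratio could be measured).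
import Mathlib
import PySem

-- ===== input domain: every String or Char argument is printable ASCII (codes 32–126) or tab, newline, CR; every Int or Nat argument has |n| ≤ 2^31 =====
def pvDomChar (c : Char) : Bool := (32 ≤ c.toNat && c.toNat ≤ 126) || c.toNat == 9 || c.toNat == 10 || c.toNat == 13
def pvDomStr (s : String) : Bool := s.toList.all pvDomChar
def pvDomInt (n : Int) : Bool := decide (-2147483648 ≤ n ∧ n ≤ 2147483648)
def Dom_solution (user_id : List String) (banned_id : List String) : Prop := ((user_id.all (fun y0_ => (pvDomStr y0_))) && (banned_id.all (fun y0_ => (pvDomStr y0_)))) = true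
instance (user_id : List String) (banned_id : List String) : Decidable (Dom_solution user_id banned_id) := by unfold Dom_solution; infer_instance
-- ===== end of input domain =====

-- B replaces A's inner enumeration of all k! permutations of each combination by a
-- backtracking assignment over precomputed per-pattern candidate index lists; intended as
-- faster (in a timing run A timed out at n=16 where B returned; no ratio was measurable).

-- ===== PORT A =====
-- possible(u, b): same length and each banned char is '*' or equals the user char
def possible (u b : String) : Bool :=
  (u.toList.length == b.toList.length) &&
  (u.toList.zip b.toList).all (fun xy => xy.2 == xy.1 || xy.2 == '*')

-- itertools.combinations → List.sublistsLen; itertools.permutations (full length) → List.permutations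
def solution (user_id : List String) (banned_id : List String) : Int :=
  (List.sublistsLen banned_id.length user_id).foldl
    (fun ans combi =>
      if (combi.permutations).any
          (fun p => (p.zip banned_id).all (fun ub => possible ub.1 ub.2))
      then ans + 1 else ans) 0

-- ===== PORT B =====
-- match(u, b) of Source B
def matchPat (u b : String) : Bool :=
  (u.toList.length == b.toList.length) &&
  (u.toList.zip b.toList).all (fun xy => xy.2 == '*' || xy.2 == xy.1)

-- cands row: [i for i in range(len(user_id)) if match(user_id[i], b)]
def candIdx (user_id : List String) (b : String) : List Nat :=
  (List.range user_id.length).filter (fun i => matchPat (user_id.getD i "") b)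

-- can_assign(cs, avail) of Source B
def canAssign : List (List Nat) → List Nat → Bool
  | [], _ => true
  | c :: cs, avail => c.any (fun i => decide (i ∈ avail) && canAssign cs (avail.erase i))

def solution_alt (user_id : List String) (banned_id : List String) : Int :=
  let cands := banned_id.map (candIdx user_id)
  ((List.sublistsLen banned_id.length (List.range user_id.length)).filter
      (fun idx => canAssign cands idx)).length

-- ===== PRECONDITION & SPEC =====
def Spec_solution (user_id : List String) (banned_id : List String) (out : Int) : Prop := out = solution_alt user_id banned_id
instance (user_id : List String) (banned_id : List String) (out : Int) : Decidable (Spec_solution user_id banned_id out) := by unfold Spec_solution; infer_instance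

-- ===== CLAIM (what is proved, stated in full; the proofs are below) =====
def Claim_equal_solution : Prop := ∀ (user_id : List String) (banned_id : List String), Dom_solution user_id banned_id → Spec_solution user_id banned_id (solution user_id banned_id)

-- ===== LEMMAS AND PROOFS =====

theorem foldl_if_countP {α : Type} (p : α → Bool) (l : List α) (s : Int) :
    l.foldl (fun a c => if p c then a + 1 else a) s = s + l.countP p := by
  induction l generalizing s with
  | nil => simp
  | cons x xs ih =>
    simp only [List.foldl_cons, List.countP_cons, ih]
    by_cases h : p x
    · simp only [h, if_true]
      push_cast
      ring
    · simp [h]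

theorem sublistsLen_map {α β : Type} (f : α → β) :
    ∀ (n : ℕ) (l : List α),
      List.sublistsLen n (l.map f) = (List.sublistsLen n l).map (List.map f)
  | 0, _ => by simp
  | n + 1, [] => by simp
  | n + 1, a :: l => by
    simp [List.sublistsLen_succ_cons, sublistsLen_map f (n + 1) l,
      sublistsLen_map f n l, List.map_map, Function.comp_def]

theorem map_getD_range {α : Type} [Inhabited α] (l : List α) (d : α) :
    (List.range l.length).map (fun i => l.getD i d) = l := by
  apply List.ext_getElem
  · simp
  · intro i h1 h2
    simp [List.getD_eq_getElem?_getD, List.getElem?_eq_getElem h2]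

theorem matchPat_eq_possible (u b : String) : matchPat u b = possible u b := by
  simp [matchPat, possible, Bool.or_comm]

-- AllQ p banned : all chosen users match their patterns (zip-truncated), Prop form
theorem all_zip_cons {α β : Type} (q : α → β → Bool) (x : α) (xs : List α) (y : β) (ys : List β) :
    ((x :: xs).zip (y :: ys)).all (fun ub => q ub.1 ub.2)
      = (q x y && (xs.zip ys).all (fun ub => q ub.1 ub.2)) := by
  simp

-- The key lemma: existence of a matching permutation of the chosen users equals
-- backtracking assignment success over the candidate lists.
theorem perm_any_eq_canAssign (user_id : List String) :
    ∀ (banned : List String) (S : List Nat), S.Nodup →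
      (∀ i ∈ S, i < user_id.length) → S.length = banned.length →
      ((S.map (fun i => user_id.getD i "")).permutations.any
          (fun p => (p.zip banned).all (fun ub => possible ub.1 ub.2))
        = canAssign (banned.map (candIdx user_id)) S) := by
  intro banned
  induction banned with
  | nil =>
    intro S _ _ hlen
    rw [List.length_eq_zero_iff.mp hlen]
    simp [canAssign]
  | cons b bs ih =>
    intro S hnd hlt hlen
    set g : Nat → String := fun i => user_id.getD i "" with hg
    rw [Bool.eq_iff_iff]
    simp only [List.any_eq_true, List.mem_permutations, List.map_cons, canAssign,
      decide_eq_true_eq, Bool.and_eq_true]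
    constructor
    · rintro ⟨p, hperm, hall⟩
      have hplen : p.length = S.length := by simpa using hperm.length_eq
      obtain ⟨u, p', rfl⟩ : ∃ u p', p = u :: p' := by
        cases p with
        | nil => exfalso; rw [hlen] at hplen; simp at hplen
        | cons u p' => exact ⟨u, p', rfl⟩
      rw [List.cons_perm_iff_perm_erase] at hperm
      obtain ⟨hu, hp'⟩ := hperm
      obtain ⟨i, hiS, hgi⟩ := List.mem_map.mp hu
      rw [all_zip_cons, Bool.and_eq_true] at hall
      refine ⟨i, ?_, hiS, ?_⟩
      · simp only [candIdx, List.mem_filter, List.mem_range]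
        refine ⟨by simpa using hlt i hiS, ?_⟩
        rw [show user_id.getD i "" = u from hgi, matchPat_eq_possible]
        exact hall.1
      · have herase : List.Perm ((S.map g).erase u) ((S.erase i).map g) := by
          have h1 : List.Perm (S.map g) (u :: (S.erase i).map g) := by
            have h2 := (List.perm_cons_erase hiS).map g
            rwa [List.map_cons, hgi] at h2
          have h3 := h1.erase u
          simpa using h3
        have hp'' : List.Perm p' ((S.erase i).map g) := hp'.trans herase
        rw [← ih (S.erase i) (hnd.erase i)
            (fun j hj => hlt j (S.erase_subset hj))
            (by rw [List.length_erase_of_mem hiS, hlen]; simp)]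
        simp only [List.any_eq_true, List.mem_permutations]
        exact ⟨p', hp'', hall.2⟩
    · rintro ⟨i, hic, hiS, hca⟩
      have hib : i < user_id.length ∧ matchPat (g i) b = true := by
        simpa [candIdx] using hic
      rw [← ih (S.erase i) (hnd.erase i)
          (fun j hj => hlt j (S.erase_subset hj))
          (by rw [List.length_erase_of_mem hiS, hlen]; simp)] at hca
      simp only [List.any_eq_true, List.mem_permutations] at hca
      obtain ⟨p', hp', hall'⟩ := hca
      refine ⟨user_id.getD i "" :: p', ?_, ?_⟩
      · have h1 : List.Perm (S.map g) (user_id.getD i "" :: (S.erase i).map g) :=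
          (List.perm_cons_erase hiS).map g
        exact (h1.trans (List.Perm.cons _ hp'.symm)).symm
      · rw [all_zip_cons, Bool.and_eq_true]
        refine ⟨?_, hall'⟩
        rw [← matchPat_eq_possible]
        exact hib.2

-- ===== VERDICT (by name: the statement is the Claim_ definition above) =====
theorem solution_spec : Claim_equal_solution := by
  intro user_id banned_id _
  unfold Spec_solution solution solution_alt
  rw [foldl_if_countP]
  have hmap : user_id = (List.range user_id.length).map (fun i => user_id.getD i "") :=
    (map_getD_range user_id "").symm
  conv_lhs => rw [hmap]
  rw [sublistsLen_map, List.countP_map]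
  show _ = ((List.filter (fun idx => canAssign (List.map (candIdx user_id) banned_id) idx)
      (List.sublistsLen banned_id.length (List.range user_id.length))).length : Int)
  rw [← List.countP_eq_length_filter]
  rw [Int.zero_add, Nat.cast_inj]
  apply List.countP_congr
  intro S hS
  obtain ⟨hsub, hlen⟩ := List.mem_sublistsLen.mp hS
  have hnd : S.Nodup := hsub.nodup List.nodup_range
  have hlt : ∀ i ∈ S, i < user_id.length := fun i hi => by
    simpa using hsub.subset hi
  simp only [Function.comp_apply, perm_any_eq_canAssign user_id banned_id S hnd hlt hlen]
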